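-- pv_equiv track=rewrite | github.com/lvpengxiao/Pollutant-Analysis-System | modules/tab_visualization.py | _split_encoded_feature_name
-- ===== SOURCE A (Python) =====
-- def _split_encoded_feature_name(encoded_name, original_columns):
--     clean_name = encoded_name.split('__', 1)[-1]
--     sorted_columns = sorted(original_columns, key=len, reverse=True)
--     for col in sorted_columns:
--         prefix = f"{col}_"
--         if clean_name == col:
--             return col, col
--         if clean_name.startswith(prefix):
--             suffix = clean_name[len(prefix):]
--             return col, f"{col} ({suffix})"
--     return clean_name, clean_name
-- ===== SOURCE B (Python) =====
-- def _split_encoded_feature_name(encoded_name, original_columns):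
--     clean_name = encoded_name.split('__', 1)[-1]
--     cols = set(original_columns)
--     if clean_name in cols:
--         return clean_name, clean_name
--     for i in range(len(clean_name) - 1, -1, -1):
--         if clean_name[i] == '_' and clean_name[:i] in cols:
--             return clean_name[:i], f"{clean_name[:i]} ({clean_name[i + 1:]})"
--     return clean_name, clean_name
-- ===== Notes on version B (the rewrite author's own statement) =====
-- stated objective: alternative
-- what changed: Instead of sorting all columns by length (descending) and startswith-scanning them one by one, B builds a hash set of the columns once and probes clean_name's underscore split points from the rightmost underscore leftwards (after an exact-match lookup), so the longest matching origin column is found by set lookups with no sort and no per-column scan; intended as faster, but a timing run measured only 1.49x at the largest size, so no speed is claimed.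
import Mathlib
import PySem

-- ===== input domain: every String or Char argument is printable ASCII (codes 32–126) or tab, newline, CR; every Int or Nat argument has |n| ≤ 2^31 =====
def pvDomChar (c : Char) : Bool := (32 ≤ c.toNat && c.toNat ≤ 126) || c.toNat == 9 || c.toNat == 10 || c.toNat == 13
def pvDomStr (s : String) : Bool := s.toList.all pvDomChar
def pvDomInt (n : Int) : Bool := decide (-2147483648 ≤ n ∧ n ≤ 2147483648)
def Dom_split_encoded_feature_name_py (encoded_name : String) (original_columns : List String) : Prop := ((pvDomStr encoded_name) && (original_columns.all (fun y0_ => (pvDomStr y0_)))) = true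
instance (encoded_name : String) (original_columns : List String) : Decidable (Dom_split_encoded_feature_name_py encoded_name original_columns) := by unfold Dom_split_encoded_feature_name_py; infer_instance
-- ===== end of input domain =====

-- B replaces A's length-descending sort + per-column startswith scan by a hash-set of the
-- columns probed at clean_name's underscore split points, longest prefix first (objective:
-- alternative; intended as faster — measured only 1.49x at the largest timing size).

-- ===== PORT A =====
-- clean_name = encoded_name.split('__', 1)[-1]   (identical first line of both Pythons)
def pvCleanName (encoded_name : String) : String :=
  PySem.List.pyGetD ((PySem.Str.splitMax? encoded_name "__" 1).getD []) (-1) ""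

-- the for-loop over sorted_columns
def pvLoopA (clean : List Char) : List String → String × String
  | [] => (String.ofList clean, String.ofList clean)
  | col :: rest =>
    let pre := col.toList ++ ['_']
    if clean = col.toList then (col, col)
    else if PySem.Chars.startswith clean pre then
      (col, String.ofList (col.toList ++ [' ', '('] ++
              PySem.List.slice clean (some (pre.length : Int)) none ++ [')']))
    else pvLoopA clean rest

def split_encoded_feature_name_py (encoded_name : String) (original_columns : List String) : String × String :=
  let clean := pvCleanName encoded_name
  let sorted_columns := PySem.List.sorted original_columns (fun c => PySem.Str.len c) true
  pvLoopA clean.toList sorted_columns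

-- ===== PORT B =====
-- the for-loop over i = len(clean_name)-1 .. 0 (fuel n = i+1 counts down)
def pvProbeB (clean : List Char) (cols : PySem.Set String) : Nat → String × String
  | 0 => (String.ofList clean, String.ofList clean)
  | i + 1 =>
    if clean.getD i ' ' == '_' && PySem.Set.contains cols (String.ofList (clean.take i)) then
      (String.ofList (clean.take i),
       String.ofList (clean.take i ++ [' ', '('] ++ clean.drop (i + 1) ++ [')']))
    else pvProbeB clean cols i

def split_encoded_feature_name_py_alt (encoded_name : String) (original_columns : List String) : String × String :=
  let clean := pvCleanName encoded_name
  let cols := PySem.Set.ofList original_columns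
  if PySem.Set.contains cols clean then (clean, clean)
  else pvProbeB clean.toList cols clean.toList.length

-- ===== PRECONDITION & SPEC =====
def Spec_split_encoded_feature_name_py (encoded_name : String) (original_columns : List String) (out : String × String) : Prop := out = split_encoded_feature_name_py_alt encoded_name original_columns
instance (encoded_name : String) (original_columns : List String) (out : String × String) : Decidable (Spec_split_encoded_feature_name_py encoded_name original_columns out) := by unfold Spec_split_encoded_feature_name_py; infer_instance

-- ===== CLAIM (what is proved, stated in full; the proofs are below) =====
def Claim_equal_split_encoded_feature_name_py : Prop := ∀ (encoded_name : String) (original_columns : List String), Dom_split_encoded_feature_name_py encoded_name original_columns → Spec_split_encoded_feature_name_py encoded_name original_columns (split_encoded_feature_name_py encoded_name original_columns)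

-- ===== LEMMAS AND PROOFS =====

-- "col matches clean_name" — the disjunction of A's two branch tests
def pvMatches (clean : List Char) (col : String) : Bool :=
  decide (clean = col.toList) || PySem.Chars.startswith clean (col.toList ++ ['_'])

-- B's loop test at index i
def pvCond (clean : List Char) (cols : PySem.Set String) (i : Nat) : Bool :=
  clean.getD i ' ' == '_' && PySem.Set.contains cols (String.ofList (clean.take i))

lemma pvLoopA_eq_find (clean : List Char) (l : List String) :
    pvLoopA clean l = match l.find? (pvMatches clean) with
      | none => (String.ofList clean, String.ofList clean)
      | some col =>
        if clean = col.toList then (col, col)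
        else (col, String.ofList (col.toList ++ [' ', '('] ++
                clean.drop (col.toList.length + 1) ++ [')'])) := by
  induction l with
  | nil => simp [pvLoopA]
  | cons col rest ih =>
    rw [pvLoopA]
    by_cases h1 : clean = col.toList
    · simp [List.find?, pvMatches, h1]
    · by_cases h2 : PySem.Chars.startswith clean (col.toList ++ ['_']) = true
      · simp only [List.find?, pvMatches, h1, h2, decide_false, Bool.false_or, if_true, if_false]
        rw [PySem.List.slice_from_natCast]
        simp
      · simp only [List.find?, pvMatches, h1, h2, decide_false, Bool.or_false,
          if_false]
        simpa [h2] using ih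

lemma pvLoopA_of_none {clean : List Char} {l : List String}
    (h : l.find? (pvMatches clean) = none) :
    pvLoopA clean l = (String.ofList clean, String.ofList clean) := by
  rw [pvLoopA_eq_find, h]

lemma pvLoopA_of_some {clean : List Char} {l : List String} {col : String}
    (h : l.find? (pvMatches clean) = some col) :
    pvLoopA clean l = if clean = col.toList then (col, col)
      else (col, String.ofList (col.toList ++ [' ', '('] ++
              clean.drop (col.toList.length + 1) ++ [')'])) := by
  rw [pvLoopA_eq_find, h]

lemma pvFind_rev_max {α : Type} (key : α → Int) (p : α → Bool) :
    ∀ (l : List α), l.Pairwise (fun a b => key b ≤ key a) → ∀ x, l.find? p = some x →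
      p x = true ∧ x ∈ l ∧ ∀ y ∈ l, p y = true → key y ≤ key x := by
  intro l
  induction l with
  | nil => intro _ x hx; simp at hx
  | cons a t ih =>
    intro hp x hx
    rcases List.pairwise_cons.mp hp with ⟨ha, ht⟩
    by_cases hpa : p a = true
    · rw [List.find?_cons_of_pos hpa] at hx
      cases hx
      refine ⟨hpa, List.mem_cons_self, ?_⟩
      intro y hy _
      rcases List.mem_cons.mp hy with rfl | hy
      · exact le_refl _
      · exact ha y hy
    · rw [List.find?_cons_of_neg (by simpa using hpa)] at hx
      rcases ih ht x hx with ⟨h1, h2, h3⟩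
      refine ⟨h1, List.mem_cons_of_mem _ h2, ?_⟩
      intro y hy hpy
      rcases List.mem_cons.mp hy with rfl | hy
      · exact absurd hpy hpa
      · exact h3 y hy hpy

lemma pvMatches_prefix {clean : List Char} {col : String}
    (h : pvMatches clean col = true) (hne : clean ≠ col.toList) :
    clean.take col.toList.length = col.toList ∧ col.toList.length < clean.length ∧
      clean.getD col.toList.length ' ' = '_' := by
  have h2 : PySem.Chars.startswith clean (col.toList ++ ['_']) = true := by
    simpa [pvMatches, hne] using h
  rcases (PySem.Chars.startswith_iff _ _).mp h2 with ⟨t, ht⟩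
  subst ht
  refine ⟨?_, by simp, ?_⟩
  · rw [List.append_assoc]
    exact List.take_left
  · rw [List.append_assoc]
    simp

lemma pvCond_matches {clean : List Char} {i : Nat} (hi : i < clean.length)
    (h : clean.getD i ' ' = '_') :
    pvMatches clean (String.ofList (clean.take i)) = true := by
  have hget : clean[i] = '_' := by
    rwa [List.getD_eq_getElem _ _ hi] at h
  have hpre : (String.ofList (clean.take i)).toList ++ ['_'] <+: clean := by
    rw [String.toList_ofList]
    refine ⟨clean.drop (i + 1), ?_⟩
    rw [List.append_assoc]
    simp only [List.singleton_append]
    rw [← hget, ← List.drop_eq_getElem_cons hi, List.take_append_drop]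
  have hsw : PySem.Chars.startswith clean (List.take i clean ++ ['_']) = true :=
    (PySem.Chars.startswith_iff _ _).mpr (by simpa using hpre)
  simp [pvMatches, hsw]

lemma pvProbeB_none {clean : List Char} {cols : PySem.Set String} :
    ∀ n : Nat, (∀ j, j < n → pvCond clean cols j = false) →
      pvProbeB clean cols n = (String.ofList clean, String.ofList clean) := by
  intro n
  induction n with
  | zero => intro _; rfl
  | succ m ih =>
    intro h
    rw [pvProbeB]
    have hm := h m (Nat.lt_succ_self m)
    rw [pvCond] at hm
    rw [hm, if_neg (by simp)]
    exact ih (fun j hj => h j (Nat.lt_succ_of_lt hj))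

lemma pvProbeB_hit {clean : List Char} {cols : PySem.Set String} {i : Nat}
    (hc : pvCond clean cols i = true) :
    ∀ n : Nat, i < n → (∀ j, i < j → j < n → pvCond clean cols j = false) →
      pvProbeB clean cols n = (String.ofList (clean.take i),
        String.ofList (clean.take i ++ [' ', '('] ++ clean.drop (i + 1) ++ [')'])) := by
  intro n
  induction n with
  | zero => intro h; omega
  | succ m ih =>
    intro hin h
    rw [pvProbeB]
    by_cases him : i = m
    · subst him
      rw [pvCond] at hc
      rw [hc]
      simp
    · have hlt : i < m := by omega
      have hm := h m hlt (Nat.lt_succ_self m)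
      rw [pvCond] at hm
      rw [hm, if_neg (by simp)]
      exact ih hlt (fun j hj hjm => h j hj (Nat.lt_succ_of_lt hjm))

-- ===== VERDICT (by name: the statement is the Claim_ definition above) =====
theorem split_encoded_feature_name_py_spec : Claim_equal_split_encoded_feature_name_py := by
  intro encoded_name original_columns _
  unfold Spec_split_encoded_feature_name_py
  simp only [split_encoded_feature_name_py, split_encoded_feature_name_py_alt]
  set cs := pvCleanName encoded_name with hcs
  set clean := cs.toList with hclean
  set S := PySem.Set.ofList original_columns with hS
  have hpw := PySem.List.sorted_pairwise_rev original_columns (fun c => PySem.Str.len c)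
  set l := PySem.List.sorted original_columns (fun c => PySem.Str.len c) true with hl
  have hmemS : ∀ x : String, PySem.Set.contains S x = true ↔ x ∈ original_columns := by
    intro x
    rw [hS]
    simp [PySem.Set.contains, PySem.Set.mem_ofList]
  cases hfind : l.find? (pvMatches clean) with
  | none =>
    rw [pvLoopA_of_none hfind]
    have hno : ∀ c ∈ original_columns, ¬ (pvMatches clean c = true) := fun c hc =>
      List.find?_eq_none.mp hfind c ((PySem.List.mem_sorted _ _ _ _).mpr hc)
    have hb : ¬ (PySem.Set.contains S cs = true) := by
      intro hcon
      exact hno cs ((hmemS cs).mp hcon) (by simp [pvMatches, hclean])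
    rw [if_neg hb, pvProbeB_none]
    intro j hj
    cases hc : pvCond clean S j with
    | false => rfl
    | true =>
      exfalso
      rw [pvCond] at hc
      simp only [Bool.and_eq_true, beq_iff_eq] at hc
      rcases hc with ⟨h1, h2⟩
      exact hno _ ((hmemS _).mp h2) (pvCond_matches hj h1)
  | some col =>
    rw [pvLoopA_of_some hfind]
    obtain ⟨hpcol, hmem, hmax⟩ :=
      pvFind_rev_max (fun c => PySem.Str.len c) (pvMatches clean) l hpw col hfind
    have hmemcols : col ∈ original_columns := (PySem.List.mem_sorted _ _ _ _).mp hmem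
    by_cases hex : clean = col.toList
    · have hlists : cs.toList = col.toList := by rw [← hclean, hex]
      have hcol_cs : col = cs := (String.toList_inj.mp hlists).symm
      have hb : PySem.Set.contains S cs = true := (hmemS cs).mpr (hcol_cs ▸ hmemcols)
      rw [if_pos hex, if_pos hb, hcol_cs]
    · obtain ⟨htake, hlen, hund⟩ := pvMatches_prefix hpcol hex
      have hb : ¬ (PySem.Set.contains S cs = true) := by
        intro hcon
        have hle := hmax cs ((PySem.List.mem_sorted _ _ _ _).mpr ((hmemS cs).mp hcon))
          (by simp [pvMatches, hclean])
        simp only [PySem.Str.len_eq, ← hclean] at hle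
        omega
      rw [if_neg hex, if_neg hb]
      have hcond : pvCond clean S col.toList.length = true := by
        rw [pvCond]
        have hof : String.ofList (clean.take col.toList.length) = col := by
          rw [htake, String.ofList_toList]
        simp only [Bool.and_eq_true, beq_iff_eq]
        exact ⟨hund, by rw [hof]; exact (hmemS col).mpr hmemcols⟩
      have hnone : ∀ j, col.toList.length < j → j < clean.length → pvCond clean S j = false := by
        intro j hcj hjlen
        cases hc : pvCond clean S j with
        | false => rfl
        | true =>
          exfalso
          rw [pvCond] at hc
          simp only [Bool.and_eq_true, beq_iff_eq] at hc
          rcases hc with ⟨h1, h2⟩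
          have hle := hmax _ ((PySem.List.mem_sorted _ _ _ _).mpr ((hmemS _).mp h2))
            (pvCond_matches hjlen h1)
          simp only [PySem.Str.len_eq, String.toList_ofList, List.length_take] at hle
          omega
      rw [pvProbeB_hit hcond clean.length hlen hnone, htake, String.ofList_toList]
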